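-- pv_equiv track=rewrite | github.com/piperdaniel1/wordle-cli-tools | wordle4_bot.py | score_word_pos
-- ===== SOURCE A (Python) =====
-- from typing import Dict, List
--
-- def score_word_pos(word : str, score_map : List[Dict[str, int]]) -> int:
--     score = 0
--
--     for index, letter in enumerate(word):
--         if word.index(letter) == index:
--             try:
--                 score += score_map[index][letter]
--             except KeyError:
--                 score += 0
--         else:
--             score -= 20
--
--     return score
-- ===== SOURCE B (Python) =====
-- def score_word_pos(word, score_map):
--     # Stage 1: one reversed pass builds a map letter -> first index
--     # (later, i.e. earlier-in-word, insertions overwrite later indices).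
--     first = {}
--     for i, c in reversed(list(enumerate(word))):
--         first[c] = i
--     # Stage 2: sum map scores over the distinct letters at their first index.
--     base = 0
--     for c, i in first.items():
--         base += score_map[i].get(c, 0)
--     # Duplicate penalty in closed form: 20 per non-first position.
--     return base - 20 * (len(word) - len(first))
-- ===== Notes on version B (the rewrite author's own statement) =====
-- stated objective: alternative
-- what changed: B replaces A's forward positional pass (first-occurrence test via word.index, -20 in an else branch) by a two-stage computation: a reversed enumerate pass builds a dict letter->first index by overwriting, then a second loop sums the map scores over that dict's items, with the whole duplicate penalty added in closed form as -20*(len(word)-len(first)).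
import Mathlib
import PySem

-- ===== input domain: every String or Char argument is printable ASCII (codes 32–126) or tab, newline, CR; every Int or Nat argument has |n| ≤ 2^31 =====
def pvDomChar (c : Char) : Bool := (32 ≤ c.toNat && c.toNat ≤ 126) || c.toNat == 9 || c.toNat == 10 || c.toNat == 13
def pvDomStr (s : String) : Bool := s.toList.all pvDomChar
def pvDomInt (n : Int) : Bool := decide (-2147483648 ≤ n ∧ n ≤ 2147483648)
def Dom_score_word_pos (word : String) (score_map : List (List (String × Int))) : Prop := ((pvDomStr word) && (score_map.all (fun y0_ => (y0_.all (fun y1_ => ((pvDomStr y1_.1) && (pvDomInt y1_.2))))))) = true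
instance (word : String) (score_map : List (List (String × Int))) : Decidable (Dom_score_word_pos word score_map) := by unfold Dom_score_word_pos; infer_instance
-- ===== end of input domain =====

-- B restructures A: a reversed enumerate pass builds a dict letter -> first index,
-- a second loop sums the map scores over that dict's items, and the duplicate
-- penalty is added in closed form as -20*(len(word)-len(first)).

-- ===== PORT A =====
-- loop 'for index, letter in enumerate(word)': the frozen whole word is carried for
-- 'word.index(letter)'; score_map[index] is exact via pyGet? — '.getD []' is only
-- reached where Python raises IndexError, which Pre_ excludes.
def scoreLoopA (w : List Char) (sm : List (List (String × Int))) :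
    Nat → List Char → Int → Int
  | _, [], score => score
  | i, c :: rest, score =>
    if PySem.List.index? w c = some i then
      scoreLoopA w sm (i + 1) rest
        (score + PySem.Dict.getD (PySem.Dict.mk ((PySem.List.pyGet? sm (i : Int)).getD []))
          (String.ofList [c]) 0)
    else
      scoreLoopA w sm (i + 1) rest (score - 20)

def score_word_pos (word : String) (score_map : List (List (String × Int))) : Int :=
  scoreLoopA word.toList score_map 0 word.toList 0

-- ===== PORT B =====
-- stage 1: 'for i, c in reversed(list(enumerate(word))): first[c] = i'
def buildFirst (w : List Char) : PySem.Dict Char Int :=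
  ((PySem.List.enumerate w 0).reverse).foldl (fun d p => d.insert p.2 p.1) PySem.Dict.empty

-- stage 2: 'for c, i in first.items(): base += score_map[i].get(c, 0)';
-- '.getD []' is only reached where Python raises IndexError, excluded by Pre_.
def score_word_pos_alt (word : String) (score_map : List (List (String × Int))) : Int :=
  ((buildFirst word.toList).items.foldl (fun s p =>
    s + PySem.Dict.getD (PySem.Dict.mk ((PySem.List.pyGet? score_map p.2).getD []))
      (String.ofList [p.1]) 0) 0)
  - 20 * ((word.toList.length : Int) - PySem.Dict.size (buildFirst word.toList))

-- ===== PRECONDITION & SPEC =====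
-- Pre_ excludes exactly the inputs where Python A raises IndexError: a first-occurrence
-- position of the word at or beyond len(score_map). (Python B raises there too.)
def Pre_score_word_pos (word : String) (score_map : List (List (String × Int))) : Prop :=
  ∀ i < word.toList.length,
    PySem.List.index? word.toList (word.toList.getD i ' ') = some i → i < score_map.length

instance (word : String) (score_map : List (List (String × Int))) :
    Decidable (Pre_score_word_pos word score_map) := by unfold Pre_score_word_pos; infer_instance

def pvWitness_score_word_pos : String × (List (List (String × Int))) :=
  ("aba", [[("a", 3)], [("b", 2)], []])

def Spec_score_word_pos (word : String) (score_map : List (List (String × Int))) (out : Int) : Prop := out = score_word_pos_alt word score_map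
instance (word : String) (score_map : List (List (String × Int))) (out : Int) : Decidable (Spec_score_word_pos word score_map out) := by unfold Spec_score_word_pos; infer_instance

-- ===== CLAIM (what is proved, stated in full; the proofs are below) =====
def Claim_equal_score_word_pos : Prop := ∀ (word : String) (score_map : List (List (String × Int))), Dom_score_word_pos word score_map → Pre_score_word_pos word score_map → Spec_score_word_pos word score_map (score_word_pos word score_map)

-- ===== LEMMAS AND PROOFS =====

-- canonical list of (first index, letter) pairs of w, in position order
def FP (w : List Char) : List (Int × Char) :=
  (PySem.List.enumerate w 0).filter
    (fun p => PySem.List.index? w p.2 == some p.1.toNat)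

theorem scoreLoopA_eq (w : List Char) (sm : List (List (String × Int))) :
    ∀ (rest pre : List Char) (s : Int), w = pre ++ rest →
      scoreLoopA w sm pre.length rest s
        = s + (((PySem.List.enumerate rest (pre.length : Int)).filter
              (fun p => PySem.List.index? w p.2 == some p.1.toNat)).map
                (fun p => PySem.Dict.getD
                  (PySem.Dict.mk ((PySem.List.pyGet? sm p.1).getD [])) (String.ofList [p.2]) 0)).sum
          - 20 * ((rest.length : Int)
              - ((PySem.List.enumerate rest (pre.length : Int)).filter
                  (fun p => PySem.List.index? w p.2 == some p.1.toNat)).length) := by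
  intro rest
  induction rest with
  | nil =>
    intro pre s _
    simp [scoreLoopA, PySem.List.enumerate_nil]
  | cons c rest ih =>
    intro pre s hw
    have hpre1 : pre.length + 1 = (pre ++ [c]).length := by simp
    have hcast : ((pre.length : Int) + 1) = ((pre ++ [c]).length : Int) := by
      push_cast [List.length_append, List.length_cons, List.length_nil]; ring
    have hw' : w = (pre ++ [c]) ++ rest := by simp [hw]
    rw [PySem.List.enumerate_cons, hcast]
    by_cases hidx : PySem.List.index? w c = some pre.length
    · have hb : (PySem.List.index? w c == some ((pre.length : Int)).toNat) = true := by
        simp only [Int.toNat_natCast, beq_iff_eq]; exact hidx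
      rw [scoreLoopA, if_pos hidx, hpre1, ih (pre ++ [c]) _ hw']
      simp only [List.filter_cons, hb, if_pos, List.map_cons, List.sum_cons,
        List.length_cons]
      push_cast
      ring
    · have hb : (PySem.List.index? w c == some ((pre.length : Int)).toNat) = false := by
        simp only [Int.toNat_natCast, beq_eq_false_iff_ne, ne_eq]; exact hidx
      rw [scoreLoopA, if_neg hidx, hpre1, ih (pre ++ [c]) _ hw']
      simp only [List.filter_cons, hb, List.length_cons]
      push_cast
      ring

-- stage-1 generic fold: the last insertion for a key wins
theorem get?_foldl_insert_pairs (m : List (Int × Char)) :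
    ∀ (d : PySem.Dict Char Int) (c : Char),
      ((m.foldl (fun d p => d.insert p.2 p.1) d).get? c)
        = (((m.reverse.find? (fun p => p.2 == c)).map (·.1)).or (d.get? c)) := by
  induction m with
  | nil => intro d c; simp
  | cons p m ih =>
    intro d c
    rw [List.foldl_cons, ih, List.reverse_cons, List.find?_append]
    cases hf : m.reverse.find? (fun q => q.2 == c) with
    | some q => simp
    | none =>
      by_cases hc : p.2 = c
      · simp [hc, PySem.Dict.get?_insert_self]
      · simp [hc, PySem.Dict.get?_insert_of_ne _ _ (Ne.symm hc)]

theorem find?_enumerate_eq_index? (c : Char) :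
    ∀ (w : List Char) (s : Int),
      ((PySem.List.enumerate w s).find? (fun p => p.2 == c)).map (·.1)
        = (PySem.List.index? w c).map (fun n : Nat => s + (n : Int)) := by
  intro w
  induction w with
  | nil => intro s; simp [PySem.List.enumerate_nil]
  | cons x w ih =>
    intro s
    rw [PySem.List.enumerate_cons]
    by_cases hc : x = c
    · subst hc
      rw [List.find?_cons_of_pos (by simp), PySem.List.index?_cons_self]
      simp
    · rw [List.find?_cons_of_neg (by simp [hc]), PySem.List.index?_cons_of_ne w hc,
        ih (s + 1)]
      cases PySem.List.index? w c with
      | none => simp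
      | some n =>
        simp only [Option.map_some, Option.some.injEq]
        push_cast
        ring

theorem get?_buildFirst (w : List Char) (c : Char) :
    (buildFirst w).get? c = (PySem.List.index? w c).map (fun n : Nat => (n : Int)) := by
  unfold buildFirst
  rw [get?_foldl_insert_pairs, List.reverse_reverse, find?_enumerate_eq_index? c w 0]
  simp

theorem nodup_keys_buildFirst (w : List Char) : (buildFirst w).keys.Nodup := by
  unfold buildFirst
  exact PySem.Dict.nodup_keys_foldl_insert_key ((PySem.List.enumerate w 0).reverse)
    (fun p : Int × Char => p.2) (fun _ p => p.1) PySem.Dict.empty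
    PySem.Dict.nodup_keys_empty

theorem mem_FP_iff (w : List Char) (i : Int) (c : Char) :
    (i, c) ∈ FP w ↔ PySem.List.index? w c = some i.toNat ∧ 0 ≤ i := by
  unfold FP
  simp only [List.mem_filter, PySem.List.mem_enumerate_iff, beq_iff_eq]
  constructor
  · rintro ⟨⟨k, hk, hpk⟩, hidx⟩
    cases hpk
    exact ⟨by simpa using hidx, by positivity⟩
  · rintro ⟨hidx, hnn⟩
    obtain ⟨hk, hget, _⟩ := PySem.List.getElem_of_index?_eq_some hidx
    refine ⟨⟨i.toNat, hk, ?_⟩, ?_⟩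
    · simp [hget, Int.toNat_of_nonneg hnn]
    · simpa using hidx

theorem nodup_FP (w : List Char) : (FP w).Nodup := by
  have h : (PySem.List.enumerate w 0).Pairwise (fun p q => p.1 < q.1) :=
    PySem.List.pairwise_lt_enumerate w 0
  have hnd : (PySem.List.enumerate w 0).Nodup := by
    refine h.imp ?_
    intro p q hlt heq
    rw [heq] at hlt; exact lt_irrefl _ hlt
  exact hnd.filter _

theorem items_perm_FP (w : List Char) :
    (buildFirst w).items.Perm ((FP w).map (fun p => (p.2, p.1))) := by
  have hndk := nodup_keys_buildFirst w
  have hnd1 : (buildFirst w).items.Nodup := by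
    have hm : ((buildFirst w).items.map (·.1)).Nodup := hndk
    exact hm.of_map
  have hnd2 : ((FP w).map (fun p => (p.2, p.1))).Nodup := by
    refine (nodup_FP w).map ?_
    intro p q h
    cases p; cases q; simpa [Prod.ext_iff, and_comm] using h
  rw [List.perm_ext_iff_of_nodup hnd1 hnd2]
  rintro ⟨c, i⟩
  constructor
  · intro hmem
    have h := (PySem.Dict.get?_eq_some_iff_mem_items (buildFirst w) c i hndk).mpr hmem
    rw [get?_buildFirst] at h
    cases hidx : PySem.List.index? w c with
    | none => rw [hidx] at h; simp at h
    | some n =>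
      rw [hidx] at h
      have h' : ((n : Nat) : Int) = i := by simpa using h
      subst h'
      exact List.mem_map.mpr
        ⟨((n : Int), c), (mem_FP_iff w n c).mpr ⟨by simpa using hidx, by positivity⟩, rfl⟩
  · intro h
    obtain ⟨⟨i', c'⟩, hmem, heq⟩ := List.mem_map.mp h
    obtain ⟨h1, h2⟩ : c' = c ∧ i' = i := by simpa [Prod.ext_iff] using heq
    obtain ⟨hidx, hnn⟩ := (mem_FP_iff w i' c').mp hmem
    rw [← h1, ← h2]
    refine (PySem.Dict.get?_eq_some_iff_mem_items (buildFirst w) c' i' hndk).mp ?_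
    rw [get?_buildFirst, hidx]
    simp [Int.toNat_of_nonneg hnn]

-- ===== VERDICT (by name: the statement is the Claim_ definition above) =====
theorem score_word_pos_spec : Claim_equal_score_word_pos := by
  intro word sm _ _
  unfold Spec_score_word_pos score_word_pos score_word_pos_alt
  have hA := scoreLoopA_eq word.toList sm word.toList [] 0 (by simp)
  simp only [List.length_nil, Nat.cast_zero] at hA
  rw [hA, PySem.List.foldl_add]
  have hperm := items_perm_FP word.toList
  have hsum := (hperm.map (fun p : Char × Int => PySem.Dict.getD
      (PySem.Dict.mk ((PySem.List.pyGet? sm p.2).getD [])) (String.ofList [p.1]) 0)).sum_eq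
  simp only [List.map_map, Function.comp_def] at hsum
  rw [hsum]
  have hsz : (PySem.Dict.size (buildFirst word.toList) : Int) = ((FP word.toList).length : Int) := by
    simp [PySem.Dict.size, hperm.length_eq]
  rw [hsz]
  unfold FP
  ring
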